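-- pv_equiv track=rewrite | github.com/Lukaslion123/Polyomino-simulation | encoder.py | binary_encode
-- ===== SOURCE A (Python) =====
-- def binary_encode(n, bit_length=None):
--     """Converts an integer to a binary list of booleans"""
--     binary_str = bin(n)[2:]
--     binary_list = [bool(int(bit)) for bit in binary_str]
--
--     if bit_length is not None:
--         current_bit_length = len(binary_list)
--         if bit_length > current_bit_length:
--             binary_list = [False] * (bit_length - current_bit_length) + binary_list
--
--     return tuple(binary_list)
-- ===== SOURCE B (Python) =====
-- def binary_encode(n, bit_length=None):
--     """Converts an integer to a binary list of booleans"""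
--     width = max(n.bit_length(), 1)
--     if bit_length is not None and bit_length > width:
--         width = bit_length
--     return tuple(bool((n >> i) & 1) for i in reversed(range(width)))
-- ===== Notes on version B (the rewrite author's own statement) =====
-- stated objective: idiomatic
-- what changed: B drops the binary-string route entirely: it computes the target width from n.bit_length() (raised by bit_length if larger) and extracts each bit arithmetically with (n >> i) & 1, MSB-to-LSB, instead of formatting bin(n), parsing each character back through int(), and prepending a padding list.
import Mathlib
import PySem

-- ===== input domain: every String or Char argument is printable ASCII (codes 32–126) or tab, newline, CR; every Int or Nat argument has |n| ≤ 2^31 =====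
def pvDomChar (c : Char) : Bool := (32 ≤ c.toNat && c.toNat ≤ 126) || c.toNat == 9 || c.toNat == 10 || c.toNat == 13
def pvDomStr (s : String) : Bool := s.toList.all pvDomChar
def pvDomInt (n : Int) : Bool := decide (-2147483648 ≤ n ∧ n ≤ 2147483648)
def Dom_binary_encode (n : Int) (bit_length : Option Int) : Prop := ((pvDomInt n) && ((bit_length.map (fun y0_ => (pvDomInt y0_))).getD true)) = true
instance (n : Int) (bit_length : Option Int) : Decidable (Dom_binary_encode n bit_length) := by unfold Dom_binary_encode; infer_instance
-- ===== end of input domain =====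

-- B replaces A's bin(n)-string formatting + int(bit) parsing + pad-list prepend by direct
-- arithmetic bit extraction (n >> i) & 1 over a precomputed width (objective: idiomatic).
-- On Pre_ (0 ≤ n) return values are proved equal; outside it A raises ValueError.

-- ===== PORT A =====
-- hand port of bin(m)[2:] for m ≥ 0 (exact there): digits of m, most-significant first
def binChars : Nat → List Char
  | 0 => []
  | m+1 => binChars ((m+1)/2) ++ [if (m+1) % 2 = 1 then '1' else '0']
decreasing_by exact Nat.div_lt_self (Nat.succ_pos m) one_lt_two

def binary_encode (n : Int) (bit_length : Option Int) : List Bool :=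
  -- bin(0)[2:] = "0"; for n > 0 the digit recursion above
  let binary_str : List Char := if n = 0 then ['0'] else binChars n.toNat
  -- bool(int(bit)): '1' ↦ true, '0' ↦ false
  let binary_list : List Bool := binary_str.map (fun c => c == '1')
  match bit_length with
  | none => binary_list
  | some b =>
      let current : Int := (binary_list.length : Int)
      if b > current then List.replicate (b - current).toNat false ++ binary_list
      else binary_list

-- ===== PORT B =====
-- hand port of int.bit_length() for m ≥ 0 (exact there)
def bitLen : Nat → Nat
  | 0 => 0
  | m+1 => bitLen ((m+1)/2) + 1
decreasing_by exact Nat.div_lt_self (Nat.succ_pos m) one_lt_two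

-- B works on the integer directly; on the admitted domain (0 ≤ n by Pre_) Python's
-- n >> i and & 1 coincide with Nat shiftRight/land on n.toNat, used here.
def binary_encode_alt (n : Int) (bit_length : Option Int) : List Bool :=
  let m : Nat := n.toNat
  let width0 : Nat := max (bitLen m) 1
  let width : Nat :=
    match bit_length with
    | some b => if b > (width0 : Int) then b.toNat else width0
    | none => width0
  (List.range width).reverse.map (fun i => ((m >>> i) &&& 1) == 1)

-- ===== PRECONDITION & SPEC =====
-- A raises ValueError for n < 0 (bin(n)[2:] then contains the 'b' of '-0b…'); Pre_ excludes those.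
def Pre_binary_encode (n : Int) (bit_length : Option Int) : Prop := 0 ≤ n
instance (n : Int) (bit_length : Option Int) : Decidable (Pre_binary_encode n bit_length) := by unfold Pre_binary_encode; infer_instance
def pvWitness_binary_encode : Int × Option Int := (6, some 5)

def Spec_binary_encode (n : Int) (bit_length : Option Int) (out : List Bool) : Prop := out = binary_encode_alt n bit_length
instance (n : Int) (bit_length : Option Int) (out : List Bool) : Decidable (Spec_binary_encode n bit_length out) := by unfold Spec_binary_encode; infer_instance

-- ===== CLAIM (what is proved, stated in full; the proofs are below) =====
def Claim_equal_binary_encode : Prop := ∀ (n : Int) (bit_length : Option Int), Dom_binary_encode n bit_length → Pre_binary_encode n bit_length → Spec_binary_encode n bit_length (binary_encode n bit_length)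

-- ===== LEMMAS AND PROOFS =====

-- B's bit-extraction list, abstracted over the width
def ext (m w : Nat) : List Bool := (List.range w).reverse.map (fun i => ((m >>> i) &&& 1) == 1)

theorem ext_zero (m : Nat) : ext m 0 = [] := rfl

theorem ext_top (m w : Nat) :
    ext m (w+1) = (((m >>> w) &&& 1) == 1) :: ext m w := by
  simp [ext, List.range_succ]

theorem ext_succ (m w : Nat) :
    ext m (w+1) = ext (m/2) w ++ [((m &&& 1) == 1)] := by
  simp [ext, List.range_succ_eq_map, List.map_reverse, Function.comp,
        Nat.shiftRight_succ_inside]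

theorem bitLen_pos (m : Nat) (h : 0 < m) : 0 < bitLen m := by
  cases m with
  | zero => omega
  | succ k => rw [bitLen]; omega

theorem core_eq (m : Nat) (h : 0 < m) :
    (binChars m).map (fun c => c == '1') = ext m (bitLen m) := by
  induction m using Nat.strong_induction_on with
  | _ m ih =>
    cases m with
    | zero => omega
    | succ k =>
      rw [binChars, bitLen, ext_succ, List.map_append]
      have hand : ((k+1) &&& 1 == 1) = ((k+1) % 2 == 1) := by
        rw [Nat.and_one_is_mod]
      by_cases hk : (k+1)/2 = 0
      · rw [hk]
        simp only [binChars, bitLen, List.map_nil, ext_zero, List.nil_append, hand]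
        have : (k+1) % 2 = 1 := by omega
        simp [this]
      · rw [ih ((k+1)/2) (Nat.div_lt_self (Nat.succ_pos k) one_lt_two) (by omega)]
        congr 1
        simp only [List.map_cons, List.map_nil, hand]
        by_cases hm : (k+1) % 2 = 1 <;> simp [hm]

theorem shift_zero (m i : Nat) (h : bitLen m ≤ i) : ((m >>> i) &&& 1 == 1) = false := by
  induction m using Nat.strong_induction_on generalizing i with
  | _ m ih =>
    cases m with
    | zero => simp
    | succ k =>
      rw [bitLen] at h
      obtain ⟨j, rfl⟩ : ∃ j, i = j + 1 := ⟨i - 1, by omega⟩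
      rw [Nat.shiftRight_succ_inside]
      exact ih ((k+1)/2) (Nat.div_lt_self (Nat.succ_pos k) one_lt_two) j (by omega)

theorem ext_pad (m L k : Nat) (h : bitLen m ≤ L) :
    ext m (L + k) = List.replicate k false ++ ext m L := by
  induction k with
  | zero => simp
  | succ k ih =>
      rw [show L + (k+1) = (L + k) + 1 by omega, ext_top, ih,
          shift_zero m (L+k) (by omega)]
      simp [List.replicate_succ]

theorem ext_length (m w : Nat) : (ext m w).length = w := by simp [ext]

-- A's unpadded list equals B's extraction at width max (bitLen m) 1
theorem core_eq_max (n : Int) (hn : 0 ≤ n) :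
    ((if n = 0 then ['0'] else binChars n.toNat).map (fun c => c == '1'))
      = ext n.toNat (max (bitLen n.toNat) 1) := by
  by_cases h0 : n = 0
  · subst h0; simp [ext, bitLen, List.range_succ]
  · have hm : 0 < n.toNat := by omega
    rw [if_neg h0, core_eq n.toNat hm,
        Nat.max_eq_left (bitLen_pos n.toNat hm)]

-- ===== VERDICT (by name: the statement is the Claim_ definition above) =====
theorem binary_encode_spec : Claim_equal_binary_encode := by
  intro n bl _ hpre
  unfold Spec_binary_encode binary_encode binary_encode_alt
  simp only []
  have extdef : ∀ w, List.map (fun i => n.toNat >>> i &&& 1 == 1) (List.range w).reverse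
      = ext n.toNat w := fun _ => rfl
  have hcore := core_eq_max n hpre
  have hlen : (((if n = 0 then ['0'] else binChars n.toNat).map (fun c => c == '1')).length)
      = max (bitLen n.toNat) 1 := by rw [hcore, ext_length]
  set L : Nat := max (bitLen n.toNat) 1 with hL
  match bl with
  | none => rw [extdef]; exact hcore
  | some b =>
      simp only [hlen]
      rw [extdef]
      by_cases hb : b > (L : Int)
      · rw [if_pos hb, if_pos hb, hcore]
        have hbn : b.toNat = L + (b - (L : Int)).toNat := by omega
        rw [hbn, ext_pad n.toNat L (b - (L : Int)).toNat (le_max_left _ _)]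
      · rw [if_neg hb, if_neg hb]
        exact hcore
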